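-- pv_equiv track=rewrite | github.com/trhariharasudhan/GrandpaAssistant | backend/app/features/voice/listen.py | _energy_segments
-- ===== SOURCE A (Python) =====
-- def _energy_segments(rms_values, threshold):
--     segments = []
--     active = None
--
--     for index, value in enumerate(rms_values):
--         if value >= threshold:
--             if active is None:
--                 active = {"start": index, "end": index, "peak": value}
--             else:
--                 active["end"] = index
--                 active["peak"] = max(active["peak"], value)
--             continue
--
--         if active is not None:
--             segments.append(active)
--             active = None
--
--     if active is not None:
--         segments.append(active)
--
--     return segments
-- ===== SOURCE B (Python) =====
-- def _energy_segments(rms_values, threshold):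
--     # Scan for the start of each above-threshold run, jump to its end,
--     # and emit one segment per run (peak = max over the run's slice).
--     segments = []
--     n = len(rms_values)
--     i = 0
--     while i < n:
--         if rms_values[i] < threshold:
--             i += 1
--             continue
--         j = i
--         while j + 1 < n and rms_values[j + 1] >= threshold:
--             j += 1
--         segments.append({"start": i, "end": j, "peak": max(rms_values[i:j + 1])})
--         i = j + 1
--     return segments
-- ===== Notes on version B (the rewrite author's own statement) =====
-- stated objective: alternative
-- what changed: Replaces the running 'active' accumulator dict that is mutated element-by-element with a run-detection scan: find the start of each above-threshold run, jump to its last index, and emit the segment in one step with max over the run's slice.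
import Mathlib
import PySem

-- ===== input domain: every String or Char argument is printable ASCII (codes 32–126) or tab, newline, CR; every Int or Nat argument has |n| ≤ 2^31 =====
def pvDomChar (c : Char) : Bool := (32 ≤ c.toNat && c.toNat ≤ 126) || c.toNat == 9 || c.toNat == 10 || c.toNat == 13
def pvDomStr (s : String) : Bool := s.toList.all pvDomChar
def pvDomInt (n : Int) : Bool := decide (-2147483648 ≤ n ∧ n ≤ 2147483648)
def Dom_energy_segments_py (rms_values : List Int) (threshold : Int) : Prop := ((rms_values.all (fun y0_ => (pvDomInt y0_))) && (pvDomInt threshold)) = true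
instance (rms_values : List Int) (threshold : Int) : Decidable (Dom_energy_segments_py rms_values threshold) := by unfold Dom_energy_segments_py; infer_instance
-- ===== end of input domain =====

-- B replaces A's running 'active' accumulator with a run-detection scan (find each
-- above-threshold run, emit its segment in one step); alternative decomposition, same cost.


-- ===== PORT A =====
-- A's 'active' dict always has exactly the keys "start","end","peak" inserted in that
-- order, and the in-place updates of "end"/"peak" keep that order; so it is carried as
-- the triple (start, end, peak) and materialized as the pair list on append.
def energySegA (threshold : Int) (segments : List (List (String × Int)))
    (active : Option (Int × Int × Int)) (index : Int) :
    List Int → List (List (String × Int))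
  | [] =>
    match active with
    | none => segments
    | some (s, e, p) => segments ++ [[("start", s), ("end", e), ("peak", p)]]
  | v :: vs =>
    if v ≥ threshold then
      match active with
      | none => energySegA threshold segments (some (index, index, v)) (index + 1) vs
      | some (s, _, p) => energySegA threshold segments (some (s, index, max p v)) (index + 1) vs
    else
      match active with
      | some (s, e, p) =>
        energySegA threshold (segments ++ [[("start", s), ("end", e), ("peak", p)]]) none (index + 1) vs
      | none => energySegA threshold segments none (index + 1) vs

def energy_segments_py (rms_values : List Int) (threshold : Int) : List (List (String × Int)) :=
  energySegA threshold [] none 0 rms_values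

-- ===== PORT B =====
-- the inner while loop of Source B (advance j to the run's end) is takeWhile/dropWhile here
def energySegB (threshold : Int) (index : Int) : List Int → List (List (String × Int))
  | [] => []
  | v :: vs =>
    if v ≥ threshold then
      let run := vs.takeWhile (fun x => decide (x ≥ threshold))
      [("start", index), ("end", index + run.length), ("peak", run.foldl max v)] ::
        energySegB threshold (index + run.length + 1) (vs.dropWhile (fun x => decide (x ≥ threshold)))
    else
      energySegB threshold (index + 1) vs
  termination_by l => l.length
  decreasing_by
    · simpa using Nat.lt_succ_of_le (vs.length_dropWhile_le _)
    · simp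

def energy_segments_py_alt (rms_values : List Int) (threshold : Int) : List (List (String × Int)) :=
  energySegB threshold 0 rms_values

-- ===== PRECONDITION & SPEC =====
def Spec_energy_segments_py (rms_values : List Int) (threshold : Int) (out : List (List (String × Int))) : Prop := out = energy_segments_py_alt rms_values threshold
instance (rms_values : List Int) (threshold : Int) (out : List (List (String × Int))) : Decidable (Spec_energy_segments_py rms_values threshold out) := by unfold Spec_energy_segments_py; infer_instance

-- ===== CLAIM (what is proved, stated in full; the proofs are below) =====
def Claim_equal_energy_segments_py : Prop := ∀ (rms_values : List Int) (threshold : Int), Dom_energy_segments_py rms_values threshold → Spec_energy_segments_py rms_values threshold (energy_segments_py rms_values threshold)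

-- ===== LEMMAS AND PROOFS =====

lemma energySeg_key (t : Int) (l : List Int) :
    (∀ segs i, energySegA t segs none i l = segs ++ energySegB t i l) ∧
    (∀ segs s p i, energySegA t segs (some (s, i - 1, p)) i l =
      segs ++ ([("start", s),
                ("end", i - 1 + ((l.takeWhile (fun x => decide (x ≥ t))).length : Int)),
                ("peak", (l.takeWhile (fun x => decide (x ≥ t))).foldl max p)] ::
        energySegB t (i + (l.takeWhile (fun x => decide (x ≥ t))).length)
          (l.dropWhile (fun x => decide (x ≥ t))))) := by
  induction l with
  | nil =>
    constructor
    · intro segs i; simp [energySegA, energySegB]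
    · intro segs s p i; simp [energySegA, energySegB]
  | cons v vs ih =>
    obtain ⟨ihn, iha⟩ := ih
    constructor
    · intro segs i
      by_cases h : v ≥ t
      · rw [show energySegA t segs none i (v :: vs)
            = energySegA t segs (some (i, i, v)) (i + 1) vs by simp [energySegA, h]]
        have := iha segs i v (i + 1)
        rw [show (i + 1 : Int) - 1 = i by ring] at this
        rw [this]
        rw [show energySegB t i (v :: vs)
            = ([("start", i),
                ("end", i + ((vs.takeWhile (fun x => decide (x ≥ t))).length : Int)),
                ("peak", (vs.takeWhile (fun x => decide (x ≥ t))).foldl max v)] ::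
              energySegB t (i + (vs.takeWhile (fun x => decide (x ≥ t))).length + 1)
                (vs.dropWhile (fun x => decide (x ≥ t)))) by
          rw [energySegB]; simp [h]]
        ring_nf
      · rw [show energySegA t segs none i (v :: vs)
            = energySegA t segs none (i + 1) vs by simp [energySegA, h]]
        rw [ihn segs (i + 1)]
        rw [show energySegB t i (v :: vs) = energySegB t (i + 1) vs by
          rw [energySegB]; simp [h]]
    · intro segs s p i
      by_cases h : v ≥ t
      · rw [show energySegA t segs (some (s, i - 1, p)) i (v :: vs)
            = energySegA t segs (some (s, i, max p v)) (i + 1) vs by simp [energySegA, h]]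
        have := iha segs s (max p v) (i + 1)
        rw [show (i + 1 : Int) - 1 = i by ring] at this
        rw [this]
        simp only [List.takeWhile, List.dropWhile, h, decide_true, List.length_cons,
          List.foldl_cons]
        push_cast
        ring_nf
      · rw [show energySegA t segs (some (s, i - 1, p)) i (v :: vs)
            = energySegA t (segs ++ [[("start", s), ("end", i - 1), ("peak", p)]]) none (i + 1) vs by
          simp [energySegA, h]]
        rw [ihn _ (i + 1)]
        simp only [List.takeWhile, List.dropWhile, h, decide_false, List.length_nil,
          Nat.cast_zero, add_zero, List.foldl_nil]
        rw [show energySegB t i (v :: vs) = energySegB t (i + 1) vs by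
          rw [energySegB]; simp [h]]
        simp

-- ===== VERDICT (by name: the statement is the Claim_ definition above) =====
theorem energy_segments_py_spec : Claim_equal_energy_segments_py := by
  intro rms t _
  unfold Spec_energy_segments_py energy_segments_py energy_segments_py_alt
  simpa using (energySeg_key t rms).1 [] 0
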